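-- pv_equiv track=rewrite | github.com/mscherrmann/AdHocPipeline | utils/cleaning_utils.py | extract_brackets
-- ===== SOURCE A (Python) =====
-- def extract_brackets(text, lang):
--     # Function the exctract the text between the outermost
--     # brackets in a string, if they exist. The text in brackets is
--     # first sored in another list and is then replaced by a
--     # specified placeholder-word in the input string
--     if lang == "de":
--         placeholder_text = "Platzhalter"
--     else:
--         placeholder_text = "placeholder"
--     text_in_brackets = []
--     text_in_brackets_act = ""
--     open_counter = 0
--     close_counter = 0
--     for char in text:
--         if open_counter > close_counter:
--             text_in_brackets_act = "".join((text_in_brackets_act, char))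
--         if char == "(" or char == "{" or char == "[":
--             open_counter += 1
--         elif char == ")" or char == "}" or char == "]":
--             close_counter += 1
--         if close_counter > 0 and open_counter == close_counter:
--             text_in_brackets.append(text_in_brackets_act[:-1])
--             text_in_brackets_act = ""
--             open_counter = 0
--             close_counter = 0
--         elif close_counter > open_counter:
--             close_counter = open_counter
--     if text_in_brackets:
--         for idx, textInBracket in enumerate(text_in_brackets):
--             text = text.replace(
--                 "(" + textInBracket + ")",
--                 "(" + placeholder_text + str(idx) + ")",
--                 1)
--             text = text.replace(
--                 "{" + textInBracket + "}",
--                 "{" + placeholder_text + str(idx) + "}",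
--                 1)
--             text = text.replace(
--                 "[" + textInBracket + "]",
--                 "[" + placeholder_text + str(idx) + "]",
--                 1)
--     return [text, text_in_brackets]
-- ===== SOURCE B (Python) =====
-- def extract_brackets(text, lang):
--     # Single depth counter + start index; bracket contents taken by slicing
--     # instead of per-char accumulation; replacement folded over a pair table.
--     placeholder_text = "Platzhalter" if lang == "de" else "placeholder"
--     found = []
--     depth = 0
--     start = 0
--     for i, ch in enumerate(text):
--         if ch in "({[":
--             if depth == 0:
--                 start = i
--             depth += 1
--         elif ch in ")}]":
--             if depth > 0:
--                 depth -= 1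
--                 if depth == 0:
--                     found.append(text[start + 1:i])
--     for idx, t in enumerate(found):
--         for o, c in (("(", ")"), ("{", "}"), ("[", "]")):
--             text = text.replace(o + t + c, o + placeholder_text + str(idx) + c, 1)
--     return [text, found]
-- ===== Notes on version B (the rewrite author's own statement) =====
-- stated objective: simpler
-- what changed: The two-counter per-character string-accumulation scanner is replaced by a single depth counter with a start index, taking each outermost bracket content as one slice text[start+1:i]; the three hand-written replace statements become one fold over a bracket-pair table.
import Mathlib
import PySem

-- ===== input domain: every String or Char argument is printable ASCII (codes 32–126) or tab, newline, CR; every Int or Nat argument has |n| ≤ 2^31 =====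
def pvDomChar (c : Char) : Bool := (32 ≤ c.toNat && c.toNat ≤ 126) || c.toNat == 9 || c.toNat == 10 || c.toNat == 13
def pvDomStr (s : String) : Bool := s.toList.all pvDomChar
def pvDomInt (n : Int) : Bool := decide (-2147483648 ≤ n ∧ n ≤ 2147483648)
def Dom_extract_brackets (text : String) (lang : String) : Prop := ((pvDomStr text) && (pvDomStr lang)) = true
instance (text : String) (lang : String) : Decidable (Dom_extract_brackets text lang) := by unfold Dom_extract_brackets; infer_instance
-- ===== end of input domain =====

-- B replaces A's two-counter, char-accumulating scanner by a depth counter with a start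
-- index and slicing, and folds the replacement over a bracket-pair table (objective: simpler).

-- s.replace(old, new, 1): exact hand port of Python's count-1 replace (PySem.Chars.replace
-- has no count); first occurrence via Chars.find, exact also for old = [] (new ++ s).
def pyReplace1 (s old new : List Char) : List Char :=
  let i := PySem.Chars.find s old
  if i < 0 then s else s.take i.toNat ++ new ++ s.drop (i.toNat + old.length)

-- ===== PORT A =====
-- loop body of A's scan; state = (text_in_brackets, text_in_brackets_act, open_counter, close_counter)
def ebStepA (st : List String × List Char × Int × Int) (c : Char) :
    List String × List Char × Int × Int :=
  let acc := if st.2.2.2 < st.2.2.1 then st.2.1 ++ [c] else st.2.1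
  let o := if c = '(' ∨ c = '{' ∨ c = '[' then st.2.2.1 + 1 else st.2.2.1
  let cl := if c = '(' ∨ c = '{' ∨ c = '[' then st.2.2.2
            else if c = ')' ∨ c = '}' ∨ c = ']' then st.2.2.2 + 1 else st.2.2.2
  if 0 < cl ∧ o = cl then (st.1 ++ [String.ofList acc.dropLast], [], 0, 0)
  else if o < cl then (st.1, acc, o, o)
  else (st.1, acc, o, cl)

-- loop body of A's replacement loop (the three sequential count-1 replaces)
def ebReplA (ph : List Char) (t : List Char) (p : Int × String) : List Char :=
  let t1 := pyReplace1 t ('(' :: p.2.toList ++ [')']) ('(' :: ph ++ PySem.Int.toChars p.1 ++ [')'])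
  let t2 := pyReplace1 t1 ('{' :: p.2.toList ++ ['}']) ('{' :: ph ++ PySem.Int.toChars p.1 ++ ['}'])
  pyReplace1 t2 ('[' :: p.2.toList ++ [']']) ('[' :: ph ++ PySem.Int.toChars p.1 ++ [']'])

def extract_brackets (text : String) (lang : String) : String × List String :=
  let ph := if lang = "de" then "Platzhalter".toList else "placeholder".toList
  let st := text.toList.foldl ebStepA ([], [], 0, 0)
  let out := if st.1 ≠ [] then (PySem.List.enumerate st.1).foldl (ebReplA ph) text.toList
             else text.toList
  (String.ofList out, st.1)

-- ===== PORT B =====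
-- loop body of B's scan; state = (found, depth, start); slices the fixed full text
def ebStepB (text : List Char) (st : List String × Int × Int) (p : Int × Char) :
    List String × Int × Int :=
  if p.2 = '(' ∨ p.2 = '{' ∨ p.2 = '[' then
    (st.1, st.2.1 + 1, if st.2.1 = 0 then p.1 else st.2.2)
  else if p.2 = ')' ∨ p.2 = '}' ∨ p.2 = ']' then
    if 0 < st.2.1 then
      ((if st.2.1 = 1 then
          st.1 ++ [String.ofList (PySem.List.slice text (some (st.2.2 + 1)) (some p.1))]
        else st.1), st.2.1 - 1, st.2.2)
    else st
  else st

-- loop body of B's replacement loop: fold over the bracket-pair table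
def ebReplB (ph : List Char) (t : List Char) (p : Int × String) : List Char :=
  [('(', ')'), ('{', '}'), ('[', ']')].foldl
    (fun t bc => pyReplace1 t (bc.1 :: p.2.toList ++ [bc.2])
                            (bc.1 :: ph ++ PySem.Int.toChars p.1 ++ [bc.2])) t

def extract_brackets_alt (text : String) (lang : String) : String × List String :=
  let ph := if lang = "de" then "Platzhalter".toList else "placeholder".toList
  let st := (PySem.List.enumerate text.toList).foldl (ebStepB text.toList) ([], 0, 0)
  let out := (PySem.List.enumerate st.1).foldl (ebReplB ph) text.toList
  (String.ofList out, st.1)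

-- ===== PRECONDITION & SPEC =====
def Spec_extract_brackets (text : String) (lang : String) (out : String × List String) : Prop := out = extract_brackets_alt text lang
instance (text : String) (lang : String) (out : String × List String) : Decidable (Spec_extract_brackets text lang out) := by unfold Spec_extract_brackets; infer_instance

-- ===== CLAIM (what is proved, stated in full; the proofs are below) =====
def Claim_equal_extract_brackets : Prop := ∀ (text : String) (lang : String), Dom_extract_brackets text lang → Spec_extract_brackets text lang (extract_brackets text lang)

-- ===== LEMMAS AND PROOFS =====

-- the two replacement-loop bodies agree (B's 3-element table fold unfolds to A's three replaces)
lemma ebReplB_eq (ph : List Char) : ebReplB ph = ebReplA ph := by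
  funext t p
  simp [ebReplB, ebReplA]

-- scan invariant: A's (acc, open, close) corresponds to B's (depth, start) over the processed prefix
lemma scan_eq (text : List Char) :
    ∀ (cs pre : List Char) (tib : List String) (acc : List Char) (o cl depth start : Int),
    text = pre ++ cs →
    ((o = 0 ∧ cl = 0 ∧ depth = 0 ∧ acc = []) ∨
     (0 ≤ cl ∧ cl < o ∧ depth = o - cl ∧ 0 ≤ start ∧ start + 1 ≤ (pre.length : Int) ∧
      acc = pre.drop (start + 1).toNat)) →
    (cs.foldl ebStepA (tib, acc, o, cl)).1 =
    ((PySem.List.enumerate cs (pre.length : Int)).foldl (ebStepB text) (tib, depth, start)).1 := by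
  intro cs
  induction cs with
  | nil =>
    intro pre tib acc o cl depth start _ _
    simp [PySem.List.enumerate_nil]
  | cons c cs ih =>
    intro pre tib acc o cl depth start htext hinv
    rw [PySem.List.enumerate_cons, List.foldl_cons, List.foldl_cons]
    have hlen : ((pre ++ [c]).length : Int) = (pre.length : Int) + 1 := by simp
    have htext' : text = (pre ++ [c]) ++ cs := by simpa using htext
    by_cases hop : c = '(' ∨ c = '{' ∨ c = '['
    · rcases hinv with ⟨ho, hcl, hd, ha⟩ | ⟨h0, hlt, hd, hs0, hs1, ha⟩
      · -- depth 0, opener: A goes to (tib, [], 1, 0); B to (tib, 1, pre.length)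
        subst ho hcl hd ha
        have hA : ebStepA (tib, [], 0, 0) c = (tib, [], 1, 0) := by
          simp [ebStepA, hop]
        have hB : ebStepB text (tib, 0, start) ((pre.length : Int), c)
            = (tib, 1, (pre.length : Int)) := by
          simp [ebStepB, hop]
        rw [hA, hB, ← hlen]
        refine ih (pre ++ [c]) tib [] 1 0 1 (pre.length : Int) htext' (Or.inr ?_)
        refine ⟨le_refl 0, by omega, by omega, by positivity, by simp, ?_⟩
        have : ((pre.length : Int) + 1).toNat = pre.length + 1 := by omega
        simp [this]
      · -- deep, opener
        have hne : ¬ (0 < cl ∧ o + 1 = cl) := by omega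
        have hne2 : ¬ (o + 1 < cl) := by omega
        have hA : ebStepA (tib, acc, o, cl) c = (tib, acc ++ [c], o + 1, cl) := by
          simp only [ebStepA, hop, if_true, if_pos hlt, if_neg hne, if_neg hne2]
        have hB : ebStepB text (tib, depth, start) ((pre.length : Int), c)
            = (tib, depth + 1, start) := by
          have : ¬ depth = 0 := by omega
          simp [ebStepB, hop, this]
        rw [hA, hB, ← hlen]
        refine ih (pre ++ [c]) tib (acc ++ [c]) (o + 1) cl (depth + 1) start htext' (Or.inr ?_)
        have hk : (start + 1).toNat ≤ pre.length := by omega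
        refine ⟨h0, by omega, by omega, hs0, by rw [hlen]; omega, ?_⟩
        rw [List.drop_append_of_le_length hk, ← ha]
    · by_cases hcls : c = ')' ∨ c = '}' ∨ c = ']'
      · rcases hinv with ⟨ho, hcl, hd, ha⟩ | ⟨h0, hlt, hd, hs0, hs1, ha⟩
        · -- depth 0, stray closer: A resets close to open; B ignores
          subst ho hcl hd ha
          have hA : ebStepA (tib, [], 0, 0) c = (tib, [], 0, 0) := by
            simp [ebStepA, hop, hcls]
          have hB : ebStepB text (tib, 0, start) ((pre.length : Int), c)
              = (tib, 0, start) := by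
            simp [ebStepB, hop, hcls]
          rw [hA, hB, ← hlen]
          exact ih (pre ++ [c]) tib [] 0 0 0 start htext' (Or.inl ⟨rfl, rfl, rfl, rfl⟩)
        · by_cases hone : o = cl + 1
          · -- deep, closing the outermost bracket: both append the content
            have hA : ebStepA (tib, acc, o, cl) c
                = (tib ++ [String.ofList acc], [], 0, 0) := by
              simp only [ebStepA, if_pos hlt, if_neg hop, if_pos hcls]
              rw [if_pos ⟨by omega, by omega⟩]
              simp
            have hslice : PySem.List.slice text (some (start + 1)) (some (pre.length : Int))
                = acc := by
              have hk : (start + 1).toNat ≤ pre.length := by omega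
              rw [htext, PySem.List.slice_toNat _ (by omega) (Int.natCast_nonneg _),
                  List.drop_append_of_le_length hk]
              have hln : (pre.drop (start + 1).toNat).length
                  = ((pre.length : Int).toNat - (start + 1).toNat) := by
                simp [List.length_drop]
              rw [List.take_left' hln, ha]
            have hB : ebStepB text (tib, depth, start) ((pre.length : Int), c)
                = (tib ++ [String.ofList acc], 0, start) := by
              have hd1 : depth = 1 := by omega
              simp [ebStepB, hop, hcls, hd1, hslice]
            rw [hA, hB, ← hlen]
            exact ih (pre ++ [c]) (tib ++ [String.ofList acc]) [] 0 0 0 start htext'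
              (Or.inl ⟨rfl, rfl, rfl, rfl⟩)
          · -- deep, inner closer
            have hA : ebStepA (tib, acc, o, cl) c = (tib, acc ++ [c], o, cl + 1) := by
              simp only [ebStepA, if_pos hlt, if_neg hop]
              have : (if c = ')' ∨ c = '}' ∨ c = ']' then cl + 1 else cl) = cl + 1 := by
                simp [hcls]
              simp only [this]
              rw [if_neg (by omega : ¬ (0 < cl + 1 ∧ o = cl + 1)), if_neg (by omega : ¬ o < cl + 1)]
            have hB : ebStepB text (tib, depth, start) ((pre.length : Int), c)
                = (tib, depth - 1, start) := by
              have h1 : 0 < depth := by omega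
              have h2 : ¬ depth = 1 := by omega
              simp [ebStepB, hop, hcls, h1, h2]
            rw [hA, hB, ← hlen]
            refine ih (pre ++ [c]) tib (acc ++ [c]) o (cl + 1) (depth - 1) start htext' (Or.inr ?_)
            have hk : (start + 1).toNat ≤ pre.length := by omega
            refine ⟨by omega, by omega, by omega, hs0, by rw [hlen]; omega, ?_⟩
            rw [List.drop_append_of_le_length hk, ← ha]
      · -- ordinary character
        rcases hinv with ⟨ho, hcl, hd, ha⟩ | ⟨h0, hlt, hd, hs0, hs1, ha⟩
        · subst ho hcl hd ha
          have hA : ebStepA (tib, [], 0, 0) c = (tib, [], 0, 0) := by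
            simp [ebStepA, hop, hcls]
          have hB : ebStepB text (tib, 0, start) ((pre.length : Int), c)
              = (tib, 0, start) := by
            simp [ebStepB, hop, hcls]
          rw [hA, hB, ← hlen]
          exact ih (pre ++ [c]) tib [] 0 0 0 start htext' (Or.inl ⟨rfl, rfl, rfl, rfl⟩)
        · have hA : ebStepA (tib, acc, o, cl) c = (tib, acc ++ [c], o, cl) := by
            simp only [ebStepA, if_pos hlt, if_neg hop, if_neg hcls]
            rw [if_neg (by omega : ¬ (0 < cl ∧ o = cl)), if_neg (by omega : ¬ o < cl)]
          have hB : ebStepB text (tib, depth, start) ((pre.length : Int), c)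
              = (tib, depth, start) := by
            simp [ebStepB, hop, hcls]
          rw [hA, hB, ← hlen]
          refine ih (pre ++ [c]) tib (acc ++ [c]) o cl depth start htext' (Or.inr ?_)
          have hk : (start + 1).toNat ≤ pre.length := by omega
          refine ⟨h0, hlt, hd, hs0, by rw [hlen]; omega, ?_⟩
          rw [List.drop_append_of_le_length hk, ← ha]

theorem extract_brackets_spec : Claim_equal_extract_brackets := by
  intro text lang _
  unfold Spec_extract_brackets
  have h := scan_eq text.toList text.toList ([] : List Char) ([] : List String)
    ([] : List Char) 0 0 0 0 (by simp) (Or.inl ⟨rfl, rfl, rfl, rfl⟩)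
  simp only [List.length_nil, Nat.cast_zero] at h
  simp only [extract_brackets, extract_brackets_alt, ebReplB_eq]
  rw [← h]
  by_cases hne : (text.toList.foldl ebStepA ([], [], 0, 0)).1 = []
  · simp [hne, PySem.List.enumerate_nil]
  · simp [hne]
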